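-- pv_equiv track=rewrite | github.com/yavuzff/cryptography-tools | cryptographyToolsTextBased.py | writeRows
-- ===== SOURCE A (Python) =====
-- def writeRows(text,table):
--     #write to table in rows
--     current = 0 #stores index of item in current row
--     index = 0 #stores index of current row
--
--     for i in text:
--         table[current][index] = i #the next availaible space in table is filled with the character
--         current += 1
--
--         if current == len(table): #if end of row is reached
--             current = 0 #the item is set back to the start
--             index += 1  #index incremented to point to next row
--
--     return table
-- ===== SOURCE B (Python) =====
-- def writeRows(text, table):
--     # Fill each slot directly by index arithmetic: table[c][r] receives text[r*n+c].
--     # Builds and returns a new table (A mutates `table` in place; return value is the same).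
--     n = len(table)
--     L = len(text)
--     return [
--         [text[r * n + c] if r * n + c < L else cell
--          for r, cell in enumerate(row)]
--         for c, row in enumerate(table)
--     ]
-- ===== Notes on version B (the rewrite author's own statement) =====
-- stated objective: alternative
-- what changed: B drops A's running current/index counters and wrap-reset branch: it traverses the table itself and computes each slot's source character by the closed-form position r*n+c (a comprehension building a new table; A mutates in place, the return value is identical).
import Mathlib
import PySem

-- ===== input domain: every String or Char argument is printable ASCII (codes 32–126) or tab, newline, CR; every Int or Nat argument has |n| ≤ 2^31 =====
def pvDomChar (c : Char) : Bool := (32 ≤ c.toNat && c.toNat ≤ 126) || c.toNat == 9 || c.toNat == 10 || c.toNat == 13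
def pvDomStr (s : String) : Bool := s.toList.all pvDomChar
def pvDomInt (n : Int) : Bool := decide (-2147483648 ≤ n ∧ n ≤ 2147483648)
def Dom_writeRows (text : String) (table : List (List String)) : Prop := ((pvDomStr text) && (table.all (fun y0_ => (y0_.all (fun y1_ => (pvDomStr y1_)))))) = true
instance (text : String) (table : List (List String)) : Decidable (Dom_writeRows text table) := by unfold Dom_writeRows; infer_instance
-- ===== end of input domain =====

-- B replaces A's running current/index counters and wrap-reset branch by closed-form
-- index arithmetic over the table itself (a comprehension); A mutates `table` in place,
-- B builds a new table — the equivalence proved here is about the return value only.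

-- ===== PORT A =====
-- literal port of A's for-loop over text with mutable state (current, index, table);
-- Python's out-of-range assignment raises IndexError: Pre_ excludes exactly those inputs,
-- so the no-op behaviour of List.set out of range is never relied on inside the claim.
def writeRowsGo (cs : List Char) (cur idx : Nat) (tb : List (List String)) : List (List String) :=
  match cs with
  | [] => tb
  | ch :: rest =>
    let tb' := tb.set cur ((tb.getD cur []).set idx (String.mk [ch]))
    if cur + 1 = tb'.length then writeRowsGo rest 0 (idx + 1) tb'
    else writeRowsGo rest (cur + 1) idx tb'

def writeRows (text : String) (table : List (List String)) : List (List String) :=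
  writeRowsGo text.toList 0 0 table

-- ===== PORT B =====
def writeRows_alt (text : String) (table : List (List String)) : List (List String) :=
  let n := table.length
  let cs := text.toList
  table.mapIdx (fun c row => row.mapIdx (fun r cell =>
    if r * n + c < cs.length then String.mk [cs.getD (r * n + c) ' '] else cell))

-- ===== PRECONDITION & SPEC =====
-- Pre_ holds exactly when Python A returns: every character position p lands in range
-- (A raises IndexError on the first p with table empty or p // n beyond row p % n).
def Pre_writeRows (text : String) (table : List (List String)) : Prop :=
  ∀ p < text.toList.length,
    0 < table.length ∧ p / table.length < (table.getD (p % table.length) []).length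

instance (text : String) (table : List (List String)) : Decidable (Pre_writeRows text table) := by
  unfold Pre_writeRows; infer_instance

def pvWitness_writeRows : String × List (List String) := ("abcd", [["x", "x"], ["y", "y"]])

def Spec_writeRows (text : String) (table : List (List String)) (out : List (List String)) : Prop := out = writeRows_alt text table
instance (text : String) (table : List (List String)) (out : List (List String)) : Decidable (Spec_writeRows text table out) := by unfold Spec_writeRows; infer_instance

-- ===== CLAIM (what is proved, stated in full; the proofs are below) =====
def Claim_equal_writeRows : Prop := ∀ (text : String) (table : List (List String)), Dom_writeRows text table → Pre_writeRows text table → Spec_writeRows text table (writeRows text table)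

-- ===== LEMMAS AND PROOFS =====

-- getD of a set list, spelled out
lemma pv_getD_set {α : Type} (l : List α) (i : Nat) (a : α) (c : Nat) (d : α) :
    (l.set i a).getD c d = if c = i ∧ i < l.length then a else l.getD c d := by
  simp only [List.getD_eq_getElem?_getD, List.getElem?_set]
  split_ifs with h1 h2 h3 <;> simp_all

-- a flat position n*j+c with c,r < n determines (c,j) uniquely
lemma pv_unique {n j c q r : Nat} (hc : c < n) (hr : r < n)
    (h : n * j + c = n * q + r) : c = r ∧ j = q := by
  have hn : 0 < n := Nat.lt_of_le_of_lt (Nat.zero_le _) hc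
  have h1 : (n * j + c) % n = c := by
    rw [Nat.mul_add_mod]; exact Nat.mod_eq_of_lt hc
  have h2 : (n * q + r) % n = r := by
    rw [Nat.mul_add_mod]; exact Nat.mod_eq_of_lt hr
  have hcr : c = r := by rw [← h1, h, h2]
  subst hcr
  have : n * j = n * q := by omega
  exact ⟨rfl, Nat.eq_of_mul_eq_mul_left hn this⟩

lemma pv_go_length (cs : List Char) (cur idx : Nat) (tb : List (List String)) :
    (writeRowsGo cs cur idx tb).length = tb.length := by
  induction cs generalizing cur idx tb with
  | nil => rfl
  | cons ch rest ih =>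
    simp only [writeRowsGo]
    split_ifs <;> simp [ih]

lemma pv_go_rowlen (cs : List Char) (cur idx : Nat) (tb : List (List String)) (c : Nat) :
    ((writeRowsGo cs cur idx tb).getD c []).length = (tb.getD c []).length := by
  induction cs generalizing cur idx tb with
  | nil => rfl
  | cons ch rest ih =>
    simp only [writeRowsGo]
    split_ifs <;>
      · rw [ih]
        rw [pv_getD_set]
        split_ifs with h
        · obtain ⟨hc, _⟩ := h; subst hc; simp
        · rfl

-- main loop invariant: starting at global position k = n*q + r, entry (c,j) of the
-- result is the character at flat position n*j + c when that lies in [k, k+|cs|),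
-- otherwise the original entry
lemma pv_go_entry (cs : List Char) (q r : Nat) (tb : List (List String))
    (hr : r < tb.length)
    (hin : ∀ i < cs.length,
      (tb.length * q + r + i) / tb.length
        < (tb.getD ((tb.length * q + r + i) % tb.length) []).length) :
    ∀ c j, c < tb.length →
      ((writeRowsGo cs r q tb).getD c []).getD j "" =
        if tb.length * q + r ≤ tb.length * j + c ∧
            tb.length * j + c < tb.length * q + r + cs.length
        then String.mk [cs.getD (tb.length * j + c - (tb.length * q + r)) ' ']
        else (tb.getD c []).getD j "" := by
  induction cs generalizing q r tb with
  | nil =>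
    intro c j hc
    simp only [writeRowsGo, List.length_nil, Nat.add_zero]
    rw [if_neg (by omega)]
  | cons ch rest ih =>
    intro c j hc
    have hn : 0 < tb.length := Nat.lt_of_le_of_lt (Nat.zero_le _) hr
    set n := tb.length with hndef
    -- position facts for the head character (i = 0)
    have hq : q < (tb.getD r []).length := by
      have h0 := hin 0 (by simp)
      have hmod : (n * q + r + 0) % n = r := by
        simp [Nat.mod_eq_of_lt hr]
      have hdiv : (n * q + r + 0) / n = q := by
        simp [Nat.mul_add_div hn, Nat.div_eq_of_lt hr]
      rw [hmod, hdiv] at h0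
      exact h0
    set s : String := String.mk [ch] with hsdef
    set tb' : List (List String) := tb.set r ((tb.getD r []).set q s) with htb'
    have htlen : tb'.length = n := by rw [htb', List.length_set]
    have hrowlen : ∀ c', (tb'.getD c' []).length = (tb.getD c' []).length := by
      intro c'
      rw [htb', pv_getD_set]
      split_ifs with h
      · obtain ⟨hc', _⟩ := h; subst hc'; simp
      · rfl
    have hentry : ∀ c' j', (tb'.getD c' []).getD j' "" =
        if c' = r ∧ j' = q then s else (tb.getD c' []).getD j' "" := by
      intro c' j'
      rw [htb', pv_getD_set]
      by_cases hcr : c' = r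
      · subst hcr
        rw [if_pos ⟨rfl, hr⟩, pv_getD_set]
        split_ifs with h1 h2 h2 <;> simp_all
      · rw [if_neg (by simp [hcr]), if_neg (by simp [hcr])]
    have hin' : ∀ i < rest.length,
        (n * q + r + (i + 1)) / n
          < (tb.getD ((n * q + r + (i + 1)) % n) []).length := by
      intro i hi
      exact hin (i + 1) (by simp; omega)
    -- unfold one loop step
    simp only [writeRowsGo]
    rw [htlen]
    by_cases hwrap : r + 1 = n
    · rw [if_pos hwrap]
      have h0 : (0 : Nat) < tb'.length := by rw [htlen]; exact hn
      have ihres := ih (q + 1) 0 tb' h0 ?hin2 c j (by rw [htlen]; exact hc)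
      case hin2 =>
        intro i hi
        have e1 : tb'.length * (q + 1) + 0 + i = n * q + r + (i + 1) := by
          rw [htlen]; rw [Nat.mul_add]; omega
        rw [e1, htlen, hrowlen]
        exact hin' i hi
      rw [ihres, htlen]
      have e1 : n * (q + 1) + 0 = n * q + r + 1 := by rw [Nat.mul_add]; omega
      rw [e1, hentry]
      by_cases hg : n * j + c = n * q + r
      · obtain ⟨hc1, hj1⟩ := pv_unique hc hr hg
        rw [if_neg (by omega), if_pos ⟨hc1, hj1⟩,
          if_pos (by simp only [List.length_cons]; omega)]
        rw [hg]
        simp [hsdef]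
      · have hne : ¬ (c = r ∧ j = q) := by
          rintro ⟨rfl, rfl⟩; exact hg rfl
        by_cases hlt : n * q + r + 1 ≤ n * j + c ∧ n * j + c < n * q + r + 1 + rest.length
        · rw [if_pos hlt, if_pos (by simp only [List.length_cons]; omega)]
          have e2 : n * j + c - (n * q + r) = (n * j + c - (n * q + r + 1)) + 1 := by omega
          rw [e2]
          simp [List.getD]
        · rw [if_neg hlt, if_neg hne, if_neg (by simp only [List.length_cons]; omega)]
    · rw [if_neg hwrap]
      have hr1 : r + 1 < tb'.length := by rw [htlen]; omega
      have ihres := ih q (r + 1) tb' hr1 ?hin3 c j (by rw [htlen]; exact hc)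
      case hin3 =>
        intro i hi
        have e1 : tb'.length * q + (r + 1) + i = n * q + r + (i + 1) := by
          rw [htlen]; omega
        rw [e1, htlen, hrowlen]
        exact hin' i hi
      rw [ihres, htlen]
      have e1 : n * q + (r + 1) = n * q + r + 1 := by omega
      rw [e1, hentry]
      by_cases hg : n * j + c = n * q + r
      · obtain ⟨hc1, hj1⟩ := pv_unique hc hr hg
        rw [if_neg (by omega), if_pos ⟨hc1, hj1⟩,
          if_pos (by simp only [List.length_cons]; omega)]
        rw [hg]
        simp [hsdef]
      · have hne : ¬ (c = r ∧ j = q) := by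
          rintro ⟨rfl, rfl⟩; exact hg rfl
        by_cases hlt : n * q + r + 1 ≤ n * j + c ∧ n * j + c < n * q + r + 1 + rest.length
        · rw [if_pos hlt, if_pos (by simp only [List.length_cons]; omega)]
          have e2 : n * j + c - (n * q + r) = (n * j + c - (n * q + r + 1)) + 1 := by omega
          rw [e2]
          simp [List.getD]
        · rw [if_neg hlt, if_neg hne, if_neg (by simp only [List.length_cons]; omega)]

lemma pv_go_nil (cs : List Char) (cur idx : Nat) :
    writeRowsGo cs cur idx [] = [] := by
  induction cs generalizing cur idx with
  | nil => rfl
  | cons ch rest ih =>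
    simp only [writeRowsGo]
    split_ifs <;> simp_all [List.getD]

-- list equality from lengths and getD-pointwise equality
lemma pv_eq_of_getD {α : Type} (d : α) (l1 l2 : List α) (hlen : l1.length = l2.length)
    (h : ∀ i < l1.length, l1.getD i d = l2.getD i d) : l1 = l2 := by
  apply List.ext_getElem hlen
  intro i h1 h2
  have hi := h i h1
  rw [List.getD_eq_getElem?_getD, List.getElem?_eq_getElem h1,
    List.getD_eq_getElem?_getD, List.getElem?_eq_getElem h2] at hi
  simpa using hi

lemma pv_getD_mapIdx {α β : Type} (l : List α) (f : Nat → α → β) (c : Nat)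
    (hc : c < l.length) (d : β) (d' : α) :
    (l.mapIdx f).getD c d = f c (l.getD c d') := by
  rw [List.getD_eq_getElem?_getD, List.getElem?_eq_getElem (by simpa using hc)]
  simp [List.getD_eq_getElem?_getD, List.getElem?_eq_getElem hc]

-- ===== VERDICT (by name: the statement is the Claim_ definition above) =====
theorem writeRows_spec : Claim_equal_writeRows := by
  intro text table _ hpre
  unfold Spec_writeRows writeRows writeRows_alt
  set cs := text.toList with hcs
  rcases Nat.eq_zero_or_pos table.length with hz | hpos
  · have : table = [] := List.length_eq_zero_iff.mp hz
    subst this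
    simp [pv_go_nil]
  · have hentry := pv_go_entry cs 0 0 table hpos (by
      intro i hi
      simpa using (hpre i (by simpa [hcs] using hi)).2)
    simp only [Nat.mul_zero, Nat.zero_add, Nat.zero_le, true_and, Nat.sub_zero] at hentry
    apply pv_eq_of_getD []
    · simp [pv_go_length]
    · intro c hcg
      have hc : c < table.length := by
        rw [pv_go_length] at hcg; exact hcg
      rw [pv_getD_mapIdx table _ c hc [] []]
      apply pv_eq_of_getD ""
      · rw [pv_go_rowlen]; simp
      · intro j hj
        have hjr : j < (table.getD c []).length := by
          rw [pv_go_rowlen] at hj; exact hj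
        rw [pv_getD_mapIdx _ _ j hjr "" ""]
        rw [hentry c j hc, Nat.mul_comm table.length j]
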